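-- pv_equiv track=rewrite | github.com/mfomin93/MP | controlapi.py | get_upgrade_url_from_model
-- ===== SOURCE A (Python) =====
-- WATTBOX_WIFI_MODELS = ["WB-150-IP-1B-2", "WB-150-IPW-1B-2", "WB-250-IPW-2"]
--
-- WATTBOX_VPS_MODELS = ["WB-800VPS-IPVM-18", "WB-800VPS-IPVM-12", "WB-800-IPVM-6", "WB-800-IPVM-12", "WB-800CH1U-IPVM-8", "WB-800CH2U-IPVM-12"]
--
-- MOIP_MODELS = ["B-900-MOIP-4K-CTRL"]
--
-- GOOD_FIRMWARE_URLS = {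
--     "wattbox-vps": "https://embedded:TKP-2000@firmware.ovrc.com/files/wattbox-vps/upgrade_wattboxvps_2.0.1.2_20201118.bin",
--     "wattbox-wifi": "https://embedded:TKP-2000@firmware.ovrc.com/files/wattbox-wifi/upgrade_wattboxwifi_2.0.1.2_20201118.bin",
--     "moip-ctrl":  "https://embedded:TKP-2000@firmware.ovrc.com/files/moip/upgrade_moip_3.1.0.2_20201119.bin"
-- }
--
-- def get_upgrade_url_from_model(model):
--
--     for m in WATTBOX_VPS_MODELS:
--         if model.rstrip() == m:
--             return GOOD_FIRMWARE_URLS["wattbox-vps"]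
--
--     for m in WATTBOX_WIFI_MODELS:
--         if model.rstrip() == m:
--             return GOOD_FIRMWARE_URLS["wattbox-wifi"]
--
--     for m in MOIP_MODELS:
--         if model.rstrip() == m:
--             return GOOD_FIRMWARE_URLS["moip-ctrl"]
--
--     return ""
-- ===== SOURCE B (Python) =====
-- _FIRMWARE_BY_MODEL = {
--     "WB-800VPS-IPVM-18": "https://embedded:TKP-2000@firmware.ovrc.com/files/wattbox-vps/upgrade_wattboxvps_2.0.1.2_20201118.bin",
--     "WB-800VPS-IPVM-12": "https://embedded:TKP-2000@firmware.ovrc.com/files/wattbox-vps/upgrade_wattboxvps_2.0.1.2_20201118.bin",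
--     "WB-800-IPVM-6": "https://embedded:TKP-2000@firmware.ovrc.com/files/wattbox-vps/upgrade_wattboxvps_2.0.1.2_20201118.bin",
--     "WB-800-IPVM-12": "https://embedded:TKP-2000@firmware.ovrc.com/files/wattbox-vps/upgrade_wattboxvps_2.0.1.2_20201118.bin",
--     "WB-800CH1U-IPVM-8": "https://embedded:TKP-2000@firmware.ovrc.com/files/wattbox-vps/upgrade_wattboxvps_2.0.1.2_20201118.bin",
--     "WB-800CH2U-IPVM-12": "https://embedded:TKP-2000@firmware.ovrc.com/files/wattbox-vps/upgrade_wattboxvps_2.0.1.2_20201118.bin",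
--     "WB-150-IP-1B-2": "https://embedded:TKP-2000@firmware.ovrc.com/files/wattbox-wifi/upgrade_wattboxwifi_2.0.1.2_20201118.bin",
--     "WB-150-IPW-1B-2": "https://embedded:TKP-2000@firmware.ovrc.com/files/wattbox-wifi/upgrade_wattboxwifi_2.0.1.2_20201118.bin",
--     "WB-250-IPW-2": "https://embedded:TKP-2000@firmware.ovrc.com/files/wattbox-wifi/upgrade_wattboxwifi_2.0.1.2_20201118.bin",
--     "B-900-MOIP-4K-CTRL": "https://embedded:TKP-2000@firmware.ovrc.com/files/moip/upgrade_moip_3.1.0.2_20201119.bin",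
-- }
--
-- def get_upgrade_url_from_model(model):
--     return _FIRMWARE_BY_MODEL.get(model.rstrip(), "")
-- ===== Notes on version B (the rewrite author's own statement) =====
-- stated objective: simpler
-- what changed: Replaced the three sequential list scans (with three branch-specific URL lookups) by a single precomputed model-to-URL dict and one lookup with an empty-string default, computing model.rstrip() once.
import Mathlib
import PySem

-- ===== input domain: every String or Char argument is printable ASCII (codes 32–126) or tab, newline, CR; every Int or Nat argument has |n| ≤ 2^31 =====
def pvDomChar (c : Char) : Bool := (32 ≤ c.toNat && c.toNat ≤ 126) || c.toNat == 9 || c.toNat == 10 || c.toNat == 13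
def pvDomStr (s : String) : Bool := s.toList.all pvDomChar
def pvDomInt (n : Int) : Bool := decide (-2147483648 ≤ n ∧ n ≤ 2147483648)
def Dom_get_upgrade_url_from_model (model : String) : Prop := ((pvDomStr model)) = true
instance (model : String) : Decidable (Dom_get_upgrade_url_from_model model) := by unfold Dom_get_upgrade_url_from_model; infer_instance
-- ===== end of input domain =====

-- B replaces A's three sequential list scans by one precomputed model->URL dict lookup (objective: simpler).
-- ===== PORT A =====
def WATTBOX_WIFI_MODELS : List String := ["WB-150-IP-1B-2", "WB-150-IPW-1B-2", "WB-250-IPW-2"]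

def WATTBOX_VPS_MODELS : List String := ["WB-800VPS-IPVM-18", "WB-800VPS-IPVM-12", "WB-800-IPVM-6", "WB-800-IPVM-12", "WB-800CH1U-IPVM-8", "WB-800CH2U-IPVM-12"]

def MOIP_MODELS : List String := ["B-900-MOIP-4K-CTRL"]

def GOOD_FIRMWARE_URLS : PySem.Dict String String := PySem.Dict.ofList [
  ("wattbox-vps", "https://embedded:TKP-2000@firmware.ovrc.com/files/wattbox-vps/upgrade_wattboxvps_2.0.1.2_20201118.bin"),
  ("wattbox-wifi", "https://embedded:TKP-2000@firmware.ovrc.com/files/wattbox-wifi/upgrade_wattboxwifi_2.0.1.2_20201118.bin"),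
  ("moip-ctrl", "https://embedded:TKP-2000@firmware.ovrc.com/files/moip/upgrade_moip_3.1.0.2_20201119.bin")]

-- one 'for m in ms: if model.rstrip() == m: return url' loop; none = loop fell through
def pvScanLoop (model : String) (ms : List String) (url : String) : Option String :=
  match ms with
  | [] => none
  | m :: rest =>
      if PySem.Str.rstrip model == m then some url else pvScanLoop model rest url

-- GOOD_FIRMWARE_URLS[k] ported via getD: the three literal keys are all present, so no KeyError arises
def get_upgrade_url_from_model (model : String) : String :=
  match pvScanLoop model WATTBOX_VPS_MODELS (GOOD_FIRMWARE_URLS.getD "wattbox-vps" "") with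
  | some r => r
  | none =>
    match pvScanLoop model WATTBOX_WIFI_MODELS (GOOD_FIRMWARE_URLS.getD "wattbox-wifi" "") with
    | some r => r
    | none =>
      match pvScanLoop model MOIP_MODELS (GOOD_FIRMWARE_URLS.getD "moip-ctrl" "") with
      | some r => r
      | none => ""

-- ===== PORT B =====
def pvFirmwareByModel : PySem.Dict String String := PySem.Dict.ofList [
  ("WB-800VPS-IPVM-18", "https://embedded:TKP-2000@firmware.ovrc.com/files/wattbox-vps/upgrade_wattboxvps_2.0.1.2_20201118.bin"),
  ("WB-800VPS-IPVM-12", "https://embedded:TKP-2000@firmware.ovrc.com/files/wattbox-vps/upgrade_wattboxvps_2.0.1.2_20201118.bin"),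
  ("WB-800-IPVM-6", "https://embedded:TKP-2000@firmware.ovrc.com/files/wattbox-vps/upgrade_wattboxvps_2.0.1.2_20201118.bin"),
  ("WB-800-IPVM-12", "https://embedded:TKP-2000@firmware.ovrc.com/files/wattbox-vps/upgrade_wattboxvps_2.0.1.2_20201118.bin"),
  ("WB-800CH1U-IPVM-8", "https://embedded:TKP-2000@firmware.ovrc.com/files/wattbox-vps/upgrade_wattboxvps_2.0.1.2_20201118.bin"),
  ("WB-800CH2U-IPVM-12", "https://embedded:TKP-2000@firmware.ovrc.com/files/wattbox-vps/upgrade_wattboxvps_2.0.1.2_20201118.bin"),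
  ("WB-150-IP-1B-2", "https://embedded:TKP-2000@firmware.ovrc.com/files/wattbox-wifi/upgrade_wattboxwifi_2.0.1.2_20201118.bin"),
  ("WB-150-IPW-1B-2", "https://embedded:TKP-2000@firmware.ovrc.com/files/wattbox-wifi/upgrade_wattboxwifi_2.0.1.2_20201118.bin"),
  ("WB-250-IPW-2", "https://embedded:TKP-2000@firmware.ovrc.com/files/wattbox-wifi/upgrade_wattboxwifi_2.0.1.2_20201118.bin"),
  ("B-900-MOIP-4K-CTRL", "https://embedded:TKP-2000@firmware.ovrc.com/files/moip/upgrade_moip_3.1.0.2_20201119.bin")]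

def get_upgrade_url_from_model_alt (model : String) : String :=
  pvFirmwareByModel.getD (PySem.Str.rstrip model) ""

-- ===== PRECONDITION & SPEC =====
def Spec_get_upgrade_url_from_model (model : String) (out : String) : Prop := out = get_upgrade_url_from_model_alt model
instance (model : String) (out : String) : Decidable (Spec_get_upgrade_url_from_model model out) := by unfold Spec_get_upgrade_url_from_model; infer_instance

-- ===== CLAIM (what is proved, stated in full; the proofs are below) =====
def Claim_equal_get_upgrade_url_from_model : Prop := ∀ (model : String), Dom_get_upgrade_url_from_model model → Spec_get_upgrade_url_from_model model (get_upgrade_url_from_model model)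

-- ===== LEMMAS AND PROOFS =====
-- evaluate the literal dict built by ofList to its Dict.mk normal form (keys are distinct)
set_option maxHeartbeats 1000000 in
theorem pvTableEval : pvFirmwareByModel = PySem.Dict.mk [
  ("WB-800VPS-IPVM-18", "https://embedded:TKP-2000@firmware.ovrc.com/files/wattbox-vps/upgrade_wattboxvps_2.0.1.2_20201118.bin"),
  ("WB-800VPS-IPVM-12", "https://embedded:TKP-2000@firmware.ovrc.com/files/wattbox-vps/upgrade_wattboxvps_2.0.1.2_20201118.bin"),
  ("WB-800-IPVM-6", "https://embedded:TKP-2000@firmware.ovrc.com/files/wattbox-vps/upgrade_wattboxvps_2.0.1.2_20201118.bin"),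
  ("WB-800-IPVM-12", "https://embedded:TKP-2000@firmware.ovrc.com/files/wattbox-vps/upgrade_wattboxvps_2.0.1.2_20201118.bin"),
  ("WB-800CH1U-IPVM-8", "https://embedded:TKP-2000@firmware.ovrc.com/files/wattbox-vps/upgrade_wattboxvps_2.0.1.2_20201118.bin"),
  ("WB-800CH2U-IPVM-12", "https://embedded:TKP-2000@firmware.ovrc.com/files/wattbox-vps/upgrade_wattboxvps_2.0.1.2_20201118.bin"),
  ("WB-150-IP-1B-2", "https://embedded:TKP-2000@firmware.ovrc.com/files/wattbox-wifi/upgrade_wattboxwifi_2.0.1.2_20201118.bin"),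
  ("WB-150-IPW-1B-2", "https://embedded:TKP-2000@firmware.ovrc.com/files/wattbox-wifi/upgrade_wattboxwifi_2.0.1.2_20201118.bin"),
  ("WB-250-IPW-2", "https://embedded:TKP-2000@firmware.ovrc.com/files/wattbox-wifi/upgrade_wattboxwifi_2.0.1.2_20201118.bin"),
  ("B-900-MOIP-4K-CTRL", "https://embedded:TKP-2000@firmware.ovrc.com/files/moip/upgrade_moip_3.1.0.2_20201119.bin")] := by decide

theorem pvUrlVps : GOOD_FIRMWARE_URLS.getD "wattbox-vps" "" = "https://embedded:TKP-2000@firmware.ovrc.com/files/wattbox-vps/upgrade_wattboxvps_2.0.1.2_20201118.bin" := by decide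
theorem pvUrlWifi : GOOD_FIRMWARE_URLS.getD "wattbox-wifi" "" = "https://embedded:TKP-2000@firmware.ovrc.com/files/wattbox-wifi/upgrade_wattboxwifi_2.0.1.2_20201118.bin" := by decide
theorem pvUrlMoip : GOOD_FIRMWARE_URLS.getD "moip-ctrl" "" = "https://embedded:TKP-2000@firmware.ovrc.com/files/moip/upgrade_moip_3.1.0.2_20201119.bin" := by decide

theorem pv_beq_swap (a b : String) : (a == b) = (b == a) := by
  rw [Bool.eq_iff_iff, beq_iff_eq, beq_iff_eq]; exact eq_comm

-- ===== VERDICT (by name: the statement is the Claim_ definition above) =====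
theorem get_upgrade_url_from_model_spec : Claim_equal_get_upgrade_url_from_model := by
  intro model _
  unfold Spec_get_upgrade_url_from_model
  simp only [get_upgrade_url_from_model, get_upgrade_url_from_model_alt,
    WATTBOX_VPS_MODELS, WATTBOX_WIFI_MODELS, MOIP_MODELS,
    pvUrlVps, pvUrlWifi, pvUrlMoip, pvScanLoop]
  simp only [pvTableEval, PySem.Dict.getD, PySem.Dict.get?_mk_cons,
    pv_beq_swap _ (PySem.Str.rstrip model)]
  split_ifs <;> rfl
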